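-- pv_equiv track=rewrite | github.com/cvr-bhupalreddy/dsa-python-2025 | DSA/BinarySearch/BS_Matrix/1.Row_with_Max1.py | row_with_max_ones_binary
-- ===== SOURCE A (Python) =====
-- import bisect
--
-- def row_with_max_ones_binary(mat):
--     max_row = -1
--     max_ones = 0
--
--     for i, row in enumerate(mat):
--         idx = bisect.bisect_left(row, 1)
--         ones = len(row) - idx
--
--         if ones > max_ones:
--             max_ones = ones
--             max_row = i
--
--     return max_row
-- ===== SOURCE B (Python) =====
-- def row_with_max_ones_binary(mat):
--     # Different decomposition: recursive slice-based bisect per row, then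
--     # pick the first index of the maximum count in a second pass.
--     def bl(row):
--         if not row:
--             return 0
--         mid = len(row) // 2
--         if row[mid] < 1:
--             return mid + 1 + bl(row[mid + 1:])
--         return bl(row[:mid])
--
--     counts = [len(r) - bl(r) for r in mat]
--     best = max(counts, default=0)
--     return counts.index(best) if best > 0 else -1
-- ===== Notes on version B (the rewrite author's own statement) =====
-- stated objective: alternative
-- what changed: Replaces the single-pass running-max loop with iterative lo/hi bisect by a two-pass pipeline: a recursive slice-based binary search per row, then max over the count list and a first-index lookup of that maximum.
import Mathlib
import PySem

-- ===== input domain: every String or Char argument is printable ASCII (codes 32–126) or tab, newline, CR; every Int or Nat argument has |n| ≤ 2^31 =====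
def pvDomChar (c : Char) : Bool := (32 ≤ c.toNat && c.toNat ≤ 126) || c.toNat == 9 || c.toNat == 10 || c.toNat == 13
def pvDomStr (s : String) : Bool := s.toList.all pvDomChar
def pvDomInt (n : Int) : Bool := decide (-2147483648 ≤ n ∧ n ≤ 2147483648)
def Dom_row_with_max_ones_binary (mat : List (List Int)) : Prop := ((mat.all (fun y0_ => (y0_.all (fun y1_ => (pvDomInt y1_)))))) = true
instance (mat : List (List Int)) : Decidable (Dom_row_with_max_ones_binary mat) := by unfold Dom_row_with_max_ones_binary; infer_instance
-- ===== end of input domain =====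

-- B replaces A's single-pass running-max loop with iterative bisect by a two-pass
-- pipeline (recursive slice-based binary search per row, then max + first-index lookup);
-- objective: alternative decomposition, same cost.

-- ===== PORT A =====
-- loop body of A's `for i, row in enumerate(mat)` (bisect.bisect_left = PySem.List.bisectLeft)
def pvStepA (st : Int × Int) (p : Int × List Int) : Int × Int :=
  let idx : Nat := PySem.List.bisectLeft p.2 1
  let ones : Int := (p.2.length : Int) - (idx : Int)
  if ones > st.2 then (p.1, ones) else st

def row_with_max_ones_binary (mat : List (List Int)) : Int :=
  ((PySem.List.enumerate mat 0).foldl pvStepA (-1, 0)).1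

-- ===== PORT B =====
-- Source B's helper `bl`: recursive binary search on slices.
-- row[mid] is always in range here (mid = len//2 < len); row[mid+1:] / row[:mid] with
-- nonnegative bounds are List.drop / List.take exactly (PySem.List.slice_from / slice_to).
def pvBl (row : List Int) : Nat :=
  if h : row = [] then 0
  else
    let mid := row.length / 2
    if row.getD mid 0 < 1 then
      mid + 1 + pvBl (row.drop (mid + 1))
    else
      pvBl (row.take mid)
termination_by row.length
decreasing_by
  · have : 0 < row.length := List.length_pos_iff.mpr h
    simp only [List.length_drop]; omega
  · have : 0 < row.length := List.length_pos_iff.mpr h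
    simp only [List.length_take]; omega

def row_with_max_ones_binary_alt (mat : List (List Int)) : Int :=
  let counts := mat.map (fun r => (r.length : Int) - (pvBl r : Int))
  let best := PySem.List.maxD counts (fun y => y) 0
  -- counts.index(best): index? is some here since best > 0 forces best ∈ counts
  if best > 0 then (((PySem.List.index? counts best).getD 0 : Nat) : Int) else -1

-- ===== PRECONDITION & SPEC =====
def Spec_row_with_max_ones_binary (mat : List (List Int)) (out : Int) : Prop := out = row_with_max_ones_binary_alt mat
instance (mat : List (List Int)) (out : Int) : Decidable (Spec_row_with_max_ones_binary mat out) := by unfold Spec_row_with_max_ones_binary; infer_instance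

-- ===== CLAIM (what is proved, stated in full; the proofs are below) =====
def Claim_equal_row_with_max_ones_binary : Prop := ∀ (mat : List (List Int)), Dom_row_with_max_ones_binary mat → Spec_row_with_max_ones_binary mat (row_with_max_ones_binary mat)

-- ===== LEMMAS AND PROOFS =====

-- pvBl never exceeds the row length (so every count is nonnegative)
theorem pvBl_le (row : List Int) : pvBl row ≤ row.length := by
  induction row using pvBl.induct with
  | case1 => simp [pvBl]
  | case2 row h mid hlt ih =>
      have hm : mid = row.length / 2 := rfl
      have hpos : 0 < row.length := List.length_pos_iff.mpr h
      rw [pvBl]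
      rw [dif_neg h, ← hm, if_pos hlt]
      simp only [List.length_drop] at ih
      omega
  | case3 row h mid hge ih =>
      have hm : mid = row.length / 2 := rfl
      have hpos : 0 < row.length := List.length_pos_iff.mpr h
      rw [pvBl]
      rw [dif_neg h, ← hm, if_neg hge]
      simp only [List.length_take] at ih
      omega

-- A's bisect loop on [lo, hi) equals B's recursive bisect on the slice
theorem loop_eq_pvBl : ∀ (fuel lo hi : Nat) (row : List Int), lo ≤ hi → hi ≤ row.length →
    hi - lo ≤ fuel →
    PySem.List.bisectLeftLoop row 1 fuel lo hi = lo + pvBl ((row.take hi).drop lo) := by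
  intro fuel
  induction fuel with
  | zero =>
      intro lo hi row h1 h2 h3
      have hle : hi = lo := by omega
      subst hle
      have hnil : (row.take hi).drop hi = [] := by
        apply List.drop_eq_nil_of_le
        simp [List.length_take]
      simp [PySem.List.bisectLeftLoop, hnil, pvBl]
  | succ fuel ih =>
      intro lo hi row h1 h2 h3
      by_cases hlt : lo < hi
      · have hmidlo : lo ≤ (lo + hi) / 2 := by omega
        have hmidhi : (lo + hi) / 2 < hi := by omega
        set mid := (lo + hi) / 2 with hmid
        have hmlen : mid < row.length := by omega
        -- the slice and its properties
        set seg := (row.take hi).drop lo with hseg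
        have hseglen : seg.length = hi - lo := by
          simp [hseg, List.length_take, List.length_drop]; omega
        have hsegne : seg ≠ [] := by
          intro hc; rw [hc] at hseglen; simp at hseglen; omega
        have hsegmid : seg.length / 2 = mid - lo := by omega
        have hget : seg.getD (seg.length / 2) 0 = row.getD mid 0 := by
          rw [hsegmid]
          simp only [hseg, List.getD, List.getElem?_drop, List.getElem?_take]
          have : lo + (mid - lo) = mid := by omega
          rw [this]
          simp [hmidhi]
        have hrowmid : row[mid]? = some (row.getD mid 0) := by
          rw [List.getElem?_eq_getElem hmlen]
          simp [List.getD, List.getElem?_eq_getElem hmlen]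
        rw [show (fuel + 1) = Nat.succ fuel from rfl]
        simp only [PySem.List.bisectLeftLoop, if_pos hlt, ← hmid, hrowmid]
        by_cases hb : row.getD mid 0 < 1
        · simp only [if_pos hb]
          have hdrop : seg.drop (seg.length / 2 + 1) = (row.take hi).drop (mid + 1) := by
            rw [hseg, List.drop_drop, hsegmid]
            congr 1; omega
          rw [pvBl]
          simp only [dif_neg hsegne, hget, if_pos hb, hdrop]
          rw [ih (mid + 1) hi row (by omega) h2 (by omega)]
          omega
        · simp only [if_neg hb]
          have htake : seg.take (seg.length / 2) = (row.take mid).drop lo := by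
            rw [hseg, List.take_drop, List.take_take, hsegmid]
            congr 2; omega
          rw [pvBl]
          simp only [dif_neg hsegne, hget, if_neg hb, htake]
          rw [ih lo mid row (by omega) (by omega) (by omega)]
      · have hle : hi = lo := by omega
        subst hle
        have hnil : (row.take hi).drop hi = [] := by
          apply List.drop_eq_nil_of_le
          simp [List.length_take]
        simp [PySem.List.bisectLeftLoop, hnil, pvBl]

theorem bisect_eq_pvBl (row : List Int) : PySem.List.bisectLeft row 1 = pvBl row := by
  unfold PySem.List.bisectLeft
  rw [loop_eq_pvBl row.length 0 row.length row (by omega) le_rfl (by omega)]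
  simp

-- proof-only recursion capturing A's fold over the per-row counts
def pvLoopC : List Int → Int → (Int × Int) → (Int × Int)
  | [], _, st => st
  | c :: cs, i, st => pvLoopC cs (i + 1) (if c > st.2 then (i, c) else st)

-- A's fold over enumerate equals pvLoopC over the counts
theorem foldA_eq : ∀ (rows : List (List Int)) (s : Int) (st : Int × Int),
    (PySem.List.enumerate rows s).foldl pvStepA st =
      pvLoopC (rows.map (fun r => (r.length : Int) - (pvBl r : Int))) s st := by
  intro rows
  induction rows with
  | nil => intro s st; simp [PySem.List.enumerate_nil, pvLoopC]
  | cons r rs ih =>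
      intro s st
      rw [PySem.List.enumerate_cons]
      simp only [List.foldl_cons, List.map_cons, pvLoopC]
      rw [ih]
      congr 1
      simp [pvStepA, bisect_eq_pvBl]

-- characterization of pvLoopC: first index of the overall maximum, if it beats mo
theorem loopC_char : ∀ (cs : List Int) (i mr mo : Int),
    pvLoopC cs i (mr, mo) =
      if cs.foldl max mo > mo
      then (i + (((PySem.List.index? cs (cs.foldl max mo)).getD 0 : Nat) : Int), cs.foldl max mo)
      else (mr, mo) := by
  intro cs
  induction cs with
  | nil => intro i mr mo; simp [pvLoopC]
  | cons c cs ih =>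
      intro i mr mo
      have hM : (c :: cs).foldl max mo = cs.foldl max (max mo c) := by simp
      by_cases hc : c > mo
      · have hmax : max mo c = c := by omega
        have hle : c ≤ cs.foldl max c := (PySem.List.le_foldl_max cs c).1
        have hM' : (c :: cs).foldl max mo = cs.foldl max c := by rw [hM, hmax]
        have hMgt : cs.foldl max c > mo := by omega
        simp only [pvLoopC, if_pos hc]
        rw [ih (i + 1) i c, hM', if_pos hMgt]
        by_cases hMc : cs.foldl max c > c
        · rw [if_pos hMc]
          have hne : c ≠ cs.foldl max c := by omega
          have hmem : cs.foldl max c ∈ cs := by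
            rcases PySem.List.foldl_max_mem cs c with h | h
            · omega
            · exact h
          rw [PySem.List.index?_cons_of_ne cs hne]
          obtain ⟨k, hk⟩ := Option.isSome_iff_exists.mp
            ((PySem.List.index?_isSome_iff cs _).mpr hmem)
          rw [hk]
          simp only [Option.map_some, Option.getD_some, Prod.mk.injEq, and_true]
          push_cast; ring
        · rw [if_neg hMc]
          have hEq : cs.foldl max c = c := by omega
          rw [hEq, PySem.List.index?_cons_self]
          simp
      · have hmax : max mo c = mo := by omega
        have hM' : (c :: cs).foldl max mo = cs.foldl max mo := by rw [hM, hmax]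
        simp only [pvLoopC, if_neg hc]
        rw [ih (i + 1) mr mo, hM']
        by_cases hMgt : cs.foldl max mo > mo
        · rw [if_pos hMgt, if_pos hMgt]
          have hne : c ≠ cs.foldl max mo := by omega
          have hmem : cs.foldl max mo ∈ cs := by
            rcases PySem.List.foldl_max_mem cs mo with h | h
            · omega
            · exact h
          rw [PySem.List.index?_cons_of_ne cs hne]
          obtain ⟨k, hk⟩ := Option.isSome_iff_exists.mp
            ((PySem.List.index?_isSome_iff cs _).mpr hmem)
          rw [hk]
          simp only [Option.map_some, Option.getD_some, Prod.mk.injEq, and_true]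
          push_cast; ring
        · rw [if_neg hMgt, if_neg hMgt]

-- every per-row count is nonnegative
theorem count_nonneg (r : List Int) : (0 : Int) ≤ (r.length : Int) - (pvBl r : Int) := by
  have := pvBl_le r
  omega

-- ===== VERDICT (by name: the statement is the Claim_ definition above) =====
theorem row_with_max_ones_binary_spec : Claim_equal_row_with_max_ones_binary := by
  intro mat _
  unfold Spec_row_with_max_ones_binary row_with_max_ones_binary
  simp only [row_with_max_ones_binary_alt]
  rw [foldA_eq, loopC_char]
  cases hl : mat.map (fun r => (r.length : Int) - (pvBl r : Int)) with
  | nil => simp [PySem.List.maxD, PySem.List.max?]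
  | cons c cs =>
      have hc0 : (0 : Int) ≤ c := by
        have hmem : c ∈ mat.map (fun r => (r.length : Int) - (pvBl r : Int)) := by
          rw [hl]; exact List.mem_cons_self
        obtain ⟨r, _, hr⟩ := List.mem_map.mp hmem
        rw [← hr]; exact count_nonneg r
      have hbest : PySem.List.maxD (c :: cs) (fun y => y) 0 = cs.foldl max c := by
        simp [PySem.List.maxD, PySem.List.max?_id_cons]
      have hM : (c :: cs).foldl max 0 = cs.foldl max c := by
        simp [show max 0 c = c by omega]
      rw [hbest, hM]
      by_cases hgt : cs.foldl max c > 0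
      · rw [if_pos hgt, if_pos hgt]; simp
      · rw [if_neg hgt, if_neg hgt]
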